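-- pv_equiv track=rewrite | github.com/Riverscapes/PNET | Network_Extraction.py | split_list_by_id
-- ===== SOURCE A (Python) =====
-- def split_list_by_id(segment_list, id_index):
--
--     to_return = []
--     current_seg = []
--     previous_id = segment_list[0][id_index]
--
--     for segment in segment_list:
--
--         # Adding a segment to the same reach
--         if segment[id_index] == previous_id:
--             current_seg.append(segment)
--
--         # Adding a new reach to the return list, then creating a new reach
--         else:
--             to_return.append(current_seg)
--             current_seg = [segment]
--             previous_id = segment[id_index]
--
--     # This makes sure that the final reach gets added, because it may be missed in the for loop
--     to_return.append(current_seg)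
--
--     # Returns a list of reaches, which each contain a list of segments, which each contain a list of field values
--     return to_return
-- ===== SOURCE B (Python) =====
-- def split_list_by_id(segment_list, id_index):
--     # Boundary-scan version: for each group, scan ahead to the first segment
--     # with a different id and slice the group out in one piece.
--     groups = []
--     n = len(segment_list)
--     i = 0
--     while i < n:
--         key = segment_list[i][id_index]
--         j = i + 1
--         while j < n and segment_list[j][id_index] == key:
--             j += 1
--         groups.append(segment_list[i:j])
--         i = j
--     return groups
-- ===== Notes on version B (the rewrite author's own statement) =====
-- stated objective: alternative
-- what changed: B scans ahead to each group boundary and slices the list group by group, instead of A's single accumulator pass that compares each element to a remembered previous id and rebuilds/flushes a current-group list.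
import Mathlib
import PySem

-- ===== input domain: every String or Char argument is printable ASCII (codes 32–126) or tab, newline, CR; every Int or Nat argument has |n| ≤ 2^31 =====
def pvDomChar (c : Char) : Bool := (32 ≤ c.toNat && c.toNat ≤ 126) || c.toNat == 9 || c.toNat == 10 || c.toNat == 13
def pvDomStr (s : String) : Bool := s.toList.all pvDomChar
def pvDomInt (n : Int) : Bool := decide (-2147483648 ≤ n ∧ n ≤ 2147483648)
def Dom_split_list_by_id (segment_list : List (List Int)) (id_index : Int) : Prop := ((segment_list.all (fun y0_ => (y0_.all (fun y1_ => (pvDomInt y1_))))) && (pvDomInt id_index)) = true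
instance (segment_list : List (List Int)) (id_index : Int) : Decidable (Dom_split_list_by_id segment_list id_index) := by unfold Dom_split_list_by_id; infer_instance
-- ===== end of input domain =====

-- B scans ahead to each group boundary and slices the list group by group (an alternative,
-- same-cost decomposition of A's accumulator pass); equivalence is proved on non-empty input
-- with the id index in range for every segment (elsewhere Python A raises IndexError).


-- ===== PORT A =====
-- segment[id_index]; under Pre_ the index is in range, so the default is never used
def pvSegId (id_index : Int) (segment : List Int) : Int :=
  (PySem.List.pyGet? segment id_index).getD 0

-- one iteration of A's for-loop over state (to_return, current_seg, previous_id)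
def pvStepA (id_index : Int) (st : List (List (List Int)) × List (List Int) × Int)
    (segment : List Int) : List (List (List Int)) × List (List Int) × Int :=
  if pvSegId id_index segment = st.2.2 then
    (st.1, st.2.1 ++ [segment], st.2.2)
  else
    (st.1 ++ [st.2.1], [segment], pvSegId id_index segment)

def split_list_by_id (segment_list : List (List Int)) (id_index : Int) :
    List (List (List Int)) :=
  let previous_id := pvSegId id_index ((PySem.List.pyGet? segment_list 0).getD [])
  let st := segment_list.foldl (pvStepA id_index) ([], [], previous_id)
  st.1 ++ [st.2.1]

-- ===== PORT B =====
-- outer while-loop of B: each call emits one group (slice up to the first different id)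
-- and recurses on the rest; the inner j-scan is the takeWhile/dropWhile split.
def split_list_by_id_alt (segment_list : List (List Int)) (id_index : Int) :
    List (List (List Int)) :=
  match segment_list with
  | [] => []   -- Python B's while loop never runs on []; unreachable under Pre_ (A raises)
  | s :: tl =>
    let key := pvSegId id_index s
    let head := (s :: tl).takeWhile (fun t => pvSegId id_index t = key)
    let rest := (s :: tl).dropWhile (fun t => pvSegId id_index t = key)
    if rest = [] then [head]
    else head :: split_list_by_id_alt rest id_index
termination_by segment_list.length
decreasing_by
  have h1 : (s :: tl).dropWhile (fun t => decide (pvSegId id_index t = pvSegId id_index s))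
      = tl.dropWhile (fun t => decide (pvSegId id_index t = pvSegId id_index s)) := by
    simp
  have h2 := List.length_dropWhile_le
      (fun t => decide (pvSegId id_index t = pvSegId id_index s)) tl
  simp only [h1, List.length_cons]
  omega

-- ===== PRECONDITION & SPEC =====
-- Pre_ excludes exactly the inputs where Python A raises IndexError: the empty list
-- (segment_list[0]) and lists with some segment for which id_index is out of range.
def Pre_split_list_by_id (segment_list : List (List Int)) (id_index : Int) : Prop :=
  segment_list ≠ [] ∧ ∀ s ∈ segment_list, PySem.Raise.InRange s.length id_index
instance (segment_list : List (List Int)) (id_index : Int) : Decidable (Pre_split_list_by_id segment_list id_index) := by unfold Pre_split_list_by_id; infer_instance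
def pvWitness_split_list_by_id : List (List Int) × Int := ([[1, 7], [1, 8], [2, 9]], 0)

def Spec_split_list_by_id (segment_list : List (List Int)) (id_index : Int) (out : List (List (List Int))) : Prop := out = split_list_by_id_alt segment_list id_index
instance (segment_list : List (List Int)) (id_index : Int) (out : List (List (List Int))) : Decidable (Spec_split_list_by_id segment_list id_index out) := by unfold Spec_split_list_by_id; infer_instance

-- ===== CLAIM (what is proved, stated in full; the proofs are below) =====
def Claim_equal_split_list_by_id : Prop := ∀ (segment_list : List (List Int)) (id_index : Int), Dom_split_list_by_id segment_list id_index → Pre_split_list_by_id segment_list id_index → Spec_split_list_by_id segment_list id_index (split_list_by_id segment_list id_index)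

-- ===== LEMMAS AND PROOFS =====

-- A's fold with the accumulator abstracted away
def pvRun (id_index : Int) (l : List (List Int)) (cur : List (List Int)) (prev : Int) :
    List (List (List Int)) × List (List Int) × Int :=
  l.foldl (pvStepA id_index) ([], cur, prev)

lemma pvFoldA_acc (id_index : Int) (l : List (List Int)) (acc : List (List (List Int)))
    (cur : List (List Int)) (prev : Int) :
    l.foldl (pvStepA id_index) (acc, cur, prev)
      = (acc ++ (pvRun id_index l cur prev).1, (pvRun id_index l cur prev).2) := by
  induction l generalizing acc cur prev with
  | nil => simp [pvRun]
  | cons s l ih =>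
    simp only [List.foldl_cons, pvRun, pvStepA]
    by_cases h : pvSegId id_index s = prev
    · rw [if_pos h, if_pos h, ih]
      rfl
    · rw [if_neg h, if_neg h, ih, ih]
      simp

-- the value A finishes with from mid-loop state (cur, prev) and remaining input l
def pvFinish (id_index : Int) (l : List (List Int)) (cur : List (List Int)) (prev : Int) :
    List (List (List Int)) :=
  (pvRun id_index l cur prev).1 ++ [(pvRun id_index l cur prev).2.1]

lemma pvFinish_nil (id_index : Int) (cur : List (List Int)) (prev : Int) :
    pvFinish id_index [] cur prev = [cur] := by
  simp [pvFinish, pvRun]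

lemma pvFinish_cons (id_index : Int) (s : List Int) (l cur : List (List Int)) (prev : Int) :
    pvFinish id_index (s :: l) cur prev
      = if pvSegId id_index s = prev then pvFinish id_index l (cur ++ [s]) prev
        else cur :: pvFinish id_index l [s] (pvSegId id_index s) := by
  by_cases h : pvSegId id_index s = prev
  · simp only [pvFinish, pvRun, List.foldl_cons, pvStepA]
    rw [if_pos h, if_pos h]
  · simp only [pvFinish, pvRun, List.foldl_cons, pvStepA]
    rw [if_neg h, if_neg h, pvFoldA_acc]
    simp [pvRun]

-- main invariant: A's finish from state (cur, k) equals B's span decomposition of the rest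
lemma pvFinish_eq_alt (id_index : Int) (l : List (List Int)) (cur : List (List Int))
    (k : Int) :
    pvFinish id_index l cur k
      = (if l.dropWhile (fun t => pvSegId id_index t = k) = []
         then [cur ++ l.takeWhile (fun t => pvSegId id_index t = k)]
         else (cur ++ l.takeWhile (fun t => pvSegId id_index t = k))
              :: split_list_by_id_alt (l.dropWhile (fun t => pvSegId id_index t = k)) id_index) := by
  induction l generalizing cur k with
  | nil => simp [pvFinish_nil]
  | cons s l ih =>
    rw [pvFinish_cons]
    by_cases h : pvSegId id_index s = k
    · rw [if_pos h]
      simp only [List.takeWhile_cons, List.dropWhile_cons, h, decide_true]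
      rw [ih]
      by_cases hd : l.dropWhile (fun t => pvSegId id_index t = k) = [] <;>
        simp [hd]
    · rw [if_neg h]
      have hdw : (s :: l).dropWhile (fun t => decide (pvSegId id_index t = k)) = s :: l := by
        simp [h]
      have htw : (s :: l).takeWhile (fun t => decide (pvSegId id_index t = k)) = [] := by
        simp [h]
      rw [hdw, htw, if_neg (List.cons_ne_nil s l)]
      simp only [List.append_nil]
      congr 1
      rw [ih]
      conv_rhs => rw [split_list_by_id_alt.eq_def]
      simp

theorem split_list_by_id_eq_alt (segment_list : List (List Int)) (id_index : Int)
    (hne : segment_list ≠ []) :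
    split_list_by_id segment_list id_index = split_list_by_id_alt segment_list id_index := by
  obtain ⟨s, l, rfl⟩ := List.exists_cons_of_ne_nil hne
  show pvFinish id_index (s :: l) []
        (pvSegId id_index ((PySem.List.pyGet? (s :: l) 0).getD [])) = _
  rw [PySem.List.pyGet?_zero_cons]
  show pvFinish id_index (s :: l) [] (pvSegId id_index s) = _
  rw [pvFinish_eq_alt]
  conv_rhs => rw [split_list_by_id_alt.eq_def]
  simp only [List.nil_append]

-- ===== VERDICT (by name: the statement is the Claim_ definition above) =====
theorem split_list_by_id_spec : Claim_equal_split_list_by_id := by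
  intro segment_list id_index _ hpre
  exact split_list_by_id_eq_alt segment_list id_index hpre.1
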